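-- pv_equiv track=rewrite | github.com/raquelduenass/codigo_sgae | utils.py | join_labels
-- ===== SOURCE A (Python) =====
-- def join_labels(pred, silence):
--     j = 0
--     for i in range(len(pred)):
--         while silence[j] != '':
--             j = j+1
--         silence[j] = pred[i]
--         j = j+1
--     return silence
-- ===== SOURCE B (Python) =====
-- def join_labels(pred, silence):
--     empties = [k for k, v in enumerate(silence) if v == '']
--     for i in range(len(pred)):
--         silence[empties[i]] = pred[i]
--     return silence
-- ===== Notes on version B (the rewrite author's own statement) =====
-- stated objective: alternative
-- what changed: A's single skip-and-fill pass with a monotonic while-loop pointer is replaced by precomputing the table of empty-slot indices once and a plain assignment loop over pred; both raise IndexError when pred has more values than empty slots.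
import Mathlib
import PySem

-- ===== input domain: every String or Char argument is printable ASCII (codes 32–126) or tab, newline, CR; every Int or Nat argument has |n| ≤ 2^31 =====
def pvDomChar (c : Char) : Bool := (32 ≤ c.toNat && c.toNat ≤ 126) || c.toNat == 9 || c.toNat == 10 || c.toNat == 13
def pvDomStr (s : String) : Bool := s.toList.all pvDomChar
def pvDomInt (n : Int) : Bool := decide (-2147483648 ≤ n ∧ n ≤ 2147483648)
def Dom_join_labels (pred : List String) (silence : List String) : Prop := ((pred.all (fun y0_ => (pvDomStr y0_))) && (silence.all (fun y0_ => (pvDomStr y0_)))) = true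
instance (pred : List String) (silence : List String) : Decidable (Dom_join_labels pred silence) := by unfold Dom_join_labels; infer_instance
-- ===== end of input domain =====

-- B changes A's skip-and-fill pointer pass into an index-table + assignment loop; equivalence is about the returned list (both Pythons mutate `silence` in place identically).

-- ===== PORT A =====
-- the `while silence[j] != '': j = j+1` loop: advances j past non-empty slots
-- (out of range = IndexError in Python; excluded by Pre_, the port then stops and returns j)
def whileSkip (s : List String) (j : Nat) : Nat :=
  if h : j < s.length then
    if s[j] = "" then j else whileSkip s (j + 1)
  else j
termination_by s.length - j

-- the `for i in range(len(pred))` loop over the remaining pred values, state (silence, j)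
def loopA : List String → List String → Nat → List String
  | [], s, _ => s
  | p :: ps, s, j =>
    let j' := whileSkip s j
    loopA ps (s.set j' p) (j' + 1)

def join_labels (pred : List String) (silence : List String) : List String :=
  loopA pred silence 0

-- ===== PORT B =====
-- empties = [k for k, v in enumerate(silence) if v == '']   (k is the enumerate counter)
def emptiesOf : List String → Nat → List Nat
  | [], _ => []
  | v :: rest, k => if v = "" then k :: emptiesOf rest (k + 1) else emptiesOf rest (k + 1)

-- for i in range(len(pred)): silence[empties[i]] = pred[i]
-- (empties[i] out of range = IndexError in Python; excluded by Pre_, the port uses getD)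
def join_labels_alt (pred : List String) (silence : List String) : List String :=
  let empties := emptiesOf silence 0
  (List.range pred.length).foldl (fun s i => s.set (empties.getD i 0) (pred.getD i "")) silence

-- ===== PRECONDITION & SPEC =====
-- Pre_ excludes exactly the inputs where Python A raises IndexError: pred has more
-- values than silence has empty slots (B raises IndexError there too).
def Pre_join_labels (pred : List String) (silence : List String) : Prop :=
  pred.length ≤ (silence.filter (fun v => v = "")).length
instance (pred : List String) (silence : List String) : Decidable (Pre_join_labels pred silence) := by unfold Pre_join_labels; infer_instance

def pvWitness_join_labels : List String × List String := (["a", "b"], ["", "x", "", ""])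

def Spec_join_labels (pred : List String) (silence : List String) (out : List String) : Prop := out = join_labels_alt pred silence
instance (pred : List String) (silence : List String) (out : List String) : Decidable (Spec_join_labels pred silence out) := by unfold Spec_join_labels; infer_instance

-- ===== CLAIM (what is proved, stated in full; the proofs are below) =====
def Claim_equal_join_labels : Prop := ∀ (pred : List String) (silence : List String), Dom_join_labels pred silence → Pre_join_labels pred silence → Spec_join_labels pred silence (join_labels pred silence)

-- ===== LEMMAS AND PROOFS =====

-- proof-side helpers: absolute indices of empty slots from position j on, and the common fill fold
def emptiesFrom (s : List String) (j : Nat) : List Nat :=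
  if h : j < s.length then
    if s[j] = "" then j :: emptiesFrom s (j + 1) else emptiesFrom s (j + 1)
  else []
termination_by s.length - j

def fill (s : List String) (pairs : List (String × Nat)) : List String :=
  pairs.foldl (fun t pk => t.set pk.2 pk.1) s

theorem emptiesFrom_eq_emptiesOf_drop (s : List String) (j : Nat) :
    emptiesFrom s j = emptiesOf (s.drop j) j := by
  unfold emptiesFrom
  split
  · next h =>
    rw [List.drop_eq_getElem_cons h]
    simp only [emptiesOf]
    split <;> rw [emptiesFrom_eq_emptiesOf_drop]
  · next h =>
    rw [List.drop_eq_nil_of_le (by omega)]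
    rfl
termination_by s.length - j

theorem length_emptiesOf (l : List String) (k : Nat) :
    (emptiesOf l k).length = (l.filter (fun v => v = "")).length := by
  induction l generalizing k with
  | nil => rfl
  | cons v rest ih =>
    simp only [emptiesOf, List.filter_cons]
    by_cases h : v = "" <;> simp [h, ih]

theorem emptiesFrom_cons (s : List String) (j : Nat) (hne : emptiesFrom s j ≠ []) :
    emptiesFrom s j = whileSkip s j :: emptiesFrom s (whileSkip s j + 1) := by
  have h1 : emptiesFrom s j = if h : j < s.length then
      (if s[j] = "" then j :: emptiesFrom s (j + 1) else emptiesFrom s (j + 1)) else [] := by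
    rw [emptiesFrom]
  by_cases h : j < s.length
  · by_cases he : s[j] = ""
    · rw [h1, whileSkip]; simp [h, he]
    · rw [h1] at hne
      simp only [h, he, dif_pos, if_false] at hne
      rw [h1, whileSkip]
      simp only [h, he, dif_pos, if_false]
      exact emptiesFrom_cons s (j + 1) hne
  · exfalso; rw [h1] at hne; simp [h] at hne
termination_by s.length - j

theorem emptiesFrom_set_lt (s : List String) (j' : Nat) (p : String) (j : Nat)
    (hlt : j' < j) : emptiesFrom (s.set j' p) j = emptiesFrom s j := by
  unfold emptiesFrom
  simp only [List.length_set]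
  split
  · next h =>
    rw [List.getElem_set_ne (by omega)]
    split <;> rw [emptiesFrom_set_lt s j' p (j + 1) (by omega)]
  · rfl
termination_by s.length - j

theorem loopA_eq_fill (ps : List String) (s : List String) (j : Nat)
    (hlen : ps.length ≤ (emptiesFrom s j).length) :
    loopA ps s j = fill s (ps.zip (emptiesFrom s j)) := by
  induction ps generalizing s j with
  | nil => rfl
  | cons p ps ih =>
    have hne : emptiesFrom s j ≠ [] := by
      intro h; rw [h] at hlen; simp at hlen
    have hcons := emptiesFrom_cons s j hne
    have hinv : emptiesFrom (s.set (whileSkip s j) p) (whileSkip s j + 1)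
        = emptiesFrom s (whileSkip s j + 1) :=
      emptiesFrom_set_lt s (whileSkip s j) p (whileSkip s j + 1) (by omega)
    simp only [loopA]
    rw [ih (s.set (whileSkip s j) p) (whileSkip s j + 1)
      (by rw [hinv]; rw [hcons] at hlen; simpa using hlen)]
    rw [hinv, hcons]
    rfl

theorem foldl_range_eq_fill (ps : List String) (E : List Nat) (s : List String)
    (n : Nat) (hn : n ≤ ps.length) (hE : n ≤ E.length) :
    (List.range n).foldl (fun t i => t.set (E.getD i 0) (ps.getD i "")) s
      = fill s ((ps.zip E).take n) := by
  induction n with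
  | zero => rfl
  | succ n ih =>
    rw [List.range_succ, List.foldl_append, ih (by omega) (by omega)]
    have hzip : n < (ps.zip E).length := by simp [List.length_zip]; omega
    rw [List.take_add_one, List.getElem?_eq_getElem hzip]
    simp only [fill, List.foldl_append, Option.toList_some, List.foldl_cons, List.foldl_nil,
      List.getElem_zip]
    rw [List.getD_eq_getElem ps "" (by omega), List.getD_eq_getElem E 0 (by omega)]

-- ===== VERDICT (by name: the statement is the Claim_ definition above) =====
theorem join_labels_spec : Claim_equal_join_labels := by
  intro pred silence _ hpre
  unfold Spec_join_labels join_labels join_labels_alt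
  have hE0 : emptiesFrom silence 0 = emptiesOf silence 0 := by
    rw [emptiesFrom_eq_emptiesOf_drop]; rfl
  have hlen : pred.length ≤ (emptiesFrom silence 0).length := by
    rw [hE0, length_emptiesOf]; exact hpre
  rw [loopA_eq_fill pred silence 0 hlen]
  rw [foldl_range_eq_fill pred (emptiesOf silence 0) silence pred.length le_rfl
    (by rw [← hE0]; exact hlen)]
  rw [hE0, List.take_of_length_le (by rw [List.length_zip]; omega)]
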